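-- pv_equiv track=rewrite | github.com/umair120115/Agent---Data-Simulator | app/nodes/batch_planner.py | plan_batches
-- ===== SOURCE A (Python) =====
-- def plan_batches(state: dict):
--     total_rows = state["num_rows"]
--     batch_size = 100
--
--     batches = []
--     for start in range(0, total_rows, batch_size):
--         batches.append({
--             "batch_id": len(batches),
--             "size": min(batch_size, total_rows - start)
--         })
--
--     return {"batches": batches}
-- ===== SOURCE B (Python) =====
-- def plan_batches(state: dict):
--     rem = state["num_rows"]
--     sizes = []
--     while rem > 100:
--         sizes.append(100)
--         rem -= 100
--     if rem > 0:
--         sizes.append(rem)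
--     return {"batches": [{"batch_id": i, "size": s} for i, s in enumerate(sizes)]}
-- ===== Notes on version B (the rewrite author's own statement) =====
-- stated objective: alternative
-- what changed: Replaces A's single stepped-range pass that builds id-carrying dicts with per-iteration min() by two staged passes: a subtractive countdown loop peeling 100 rows at a time into a plain size list, then an enumerate pass attaching batch ids.
import Mathlib
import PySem

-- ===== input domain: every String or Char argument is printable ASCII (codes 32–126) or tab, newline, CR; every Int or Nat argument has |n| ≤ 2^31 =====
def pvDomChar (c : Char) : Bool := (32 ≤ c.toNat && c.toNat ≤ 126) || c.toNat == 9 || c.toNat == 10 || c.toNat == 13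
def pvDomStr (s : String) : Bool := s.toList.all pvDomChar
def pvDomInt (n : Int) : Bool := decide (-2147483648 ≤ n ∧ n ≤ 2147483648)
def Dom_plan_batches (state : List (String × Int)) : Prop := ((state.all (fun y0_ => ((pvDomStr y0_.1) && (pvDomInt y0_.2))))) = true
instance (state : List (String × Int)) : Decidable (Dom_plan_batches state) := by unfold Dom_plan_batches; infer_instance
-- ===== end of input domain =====

-- B restructures A: instead of one stepped-range loop building id-carrying dicts with per-iteration min(), B runs a subtractive countdown loop producing a plain size list, then attaches batch ids with enumerate; objective: alternative.


-- ===== PORT A =====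
def plan_batches (state : List (String × Int)) : List (String × List (List (String × Int))) :=
  match (PySem.Dict.mk state).get? "num_rows" with
  | none => []  -- Python raises KeyError here; excluded by Pre_
  | some total_rows =>
    let batches := (PySem.List.pyRange 0 total_rows 100).foldl
      (fun batches start =>
        batches ++ [[("batch_id", (batches.length : Int)),
                     ("size", min 100 (total_rows - start))]])
      ([] : List (List (String × Int)))
    [("batches", batches)]

-- ===== PORT B =====
-- Source B's 'while rem > 100: append 100; rem -= 100' loop followed by the final 'if rem > 0'
-- as the obvious structural recursion on the remaining count.
def pvSizesB (rem : Int) : List Int :=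
  if 100 < rem then 100 :: pvSizesB (rem - 100)
  else if 0 < rem then [rem] else []
termination_by rem.toNat
decreasing_by omega

def plan_batches_alt (state : List (String × Int)) : List (String × List (List (String × Int))) :=
  match (PySem.Dict.mk state).get? "num_rows" with
  | none => []  -- Python raises KeyError here; excluded by Pre_
  | some n =>
    [("batches", (PySem.List.enumerate (pvSizesB n) 0).map
        (fun p => [("batch_id", p.1), ("size", p.2)]))]

-- ===== PRECONDITION & SPEC =====
-- Pre_ excludes only the states without a "num_rows" key, on which Python A raises KeyError.
def Pre_plan_batches (state : List (String × Int)) : Prop := "num_rows" ∈ state.map Prod.fst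
instance (state : List (String × Int)) : Decidable (Pre_plan_batches state) := by unfold Pre_plan_batches; infer_instance
def pvWitness_plan_batches : (List (String × Int)) := [("num_rows", 250)]
def Spec_plan_batches (state : List (String × Int)) (out : List (String × List (List (String × Int)))) : Prop := out = plan_batches_alt state
instance (state : List (String × Int)) (out : List (String × List (List (String × Int)))) : Decidable (Spec_plan_batches state out) := by unfold Spec_plan_batches; infer_instance

-- ===== CLAIM (what is proved, stated in full; the proofs are below) =====
def Claim_equal_plan_batches : Prop := ∀ (state : List (String × Int)), Dom_plan_batches state → Pre_plan_batches state → Spec_plan_batches state (plan_batches state)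

-- ===== LEMMAS AND PROOFS =====

-- number of batches for n rows
def pvK (n : Int) : Nat := if 0 < n then ((n + 99) / 100).toNat else 0

-- A's append-with-current-length loop over List.range is the map indexed by the range element.
lemma foldl_len_range {β : Type} (g : Int → Nat → β) :
    ∀ (K : Nat), (List.range K).foldl (fun bs k => bs ++ [g (bs.length : Int) k]) ([] : List β)
      = (List.range K).map (fun k : Nat => g (k : Int) k) := by
  intro K
  induction K with
  | zero => simp
  | succ K ih => simp [List.range_succ, ih]

-- closed form of A's loop
lemma a_closed (n : Int) :
    (PySem.List.pyRange 0 n 100).foldl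
      (fun batches start =>
        batches ++ [[("batch_id", (batches.length : Int)),
                     ("size", min 100 (n - start))]])
      ([] : List (List (String × Int)))
    = (List.range (pvK n)).map
        (fun k : Nat => [("batch_id", (k : Int)), ("size", min 100 (n - 100 * (k : Int)))]) := by
  have h100 : (0:Int) < 100 := by norm_num
  rw [PySem.List.pyRange_of_pos 0 n h100]
  rw [List.foldl_map]
  rw [foldl_len_range (fun len k => [("batch_id", len), ("size", min 100 (n - (0 + 100 * (k : Int))))])]
  have hK : (if (0:Int) < n then ((n - 0 + 100 - 1) / 100).toNat else 0) = pvK n := by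
    unfold pvK
    split_ifs with h
    · congr 1; omega
    · rfl
  rw [hK]
  refine List.map_congr_left ?_
  intro k _
  norm_num

-- closed form of B's staged passes, generalized over the enumerate start index
lemma b_closed (m : Nat) : ∀ (n s : Int), pvK n = m →
    (PySem.List.enumerate (pvSizesB n) s).map
      (fun p => ([("batch_id", p.1), ("size", p.2)] : List (String × Int)))
    = (List.range m).map
        (fun k : Nat => [("batch_id", s + (k : Int)), ("size", min 100 (n - 100 * (k : Int)))]) := by
  induction m with
  | zero =>
    intro n s hm
    have hn : ¬ 0 < n := by
      intro h
      unfold pvK at hm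
      rw [if_pos h] at hm
      omega
    rw [pvSizesB, if_neg (by omega), if_neg hn]
    simp [PySem.List.enumerate_nil]
  | succ m ih =>
    intro n s hm
    have hn : 0 < n := by
      by_contra h
      unfold pvK at hm; rw [if_neg h] at hm; omega
    rw [List.range_succ_eq_map, List.map_cons, List.map_map]
    by_cases h100 : 100 < n
    · have hm' : pvK (n - 100) = m := by
        unfold pvK at hm ⊢
        rw [if_pos hn] at hm
        by_cases hp : 0 < n - 100
        · rw [if_pos hp]
          have : n + 99 = (n - 100 + 99) + 1 * 100 := by omega
          rw [this, Int.add_mul_ediv_right _ _ (by norm_num)] at hm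
          omega
        · omega
      rw [pvSizesB, if_pos h100, PySem.List.enumerate_cons, List.map_cons,
          ih (n - 100) (s + 1) hm', List.cons_eq_cons]
      refine ⟨?_, ?_⟩
      · simp
        omega
      · refine List.map_congr_left ?_
        intro k _
        simp only [Function.comp]
        have h1 : s + 1 + (k : Int) = s + ((k.succ : Nat) : Int) := by push_cast; ring
        have h2 : n - 100 - 100 * (k : Int) = n - 100 * ((k.succ : Nat) : Int) := by push_cast; ring
        rw [h1, h2]
    · -- 0 < n ≤ 100 : one batch of size n, and m must be 0
      have hm0 : m = 0 := by
        unfold pvK at hm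
        rw [if_pos hn] at hm
        have h1 : n + 99 = (n - 1) + 1 * 100 := by omega
        rw [h1, Int.add_mul_ediv_right _ _ (by norm_num : (100:Int) ≠ 0),
            Int.ediv_eq_zero_of_lt (by omega) (by omega)] at hm
        omega
      subst hm0
      rw [pvSizesB, if_neg h100, if_pos hn]
      simp [PySem.List.enumerate_cons, PySem.List.enumerate_nil]
      omega

-- ===== VERDICT (by name: the statement is the Claim_ definition above) =====
theorem plan_batches_spec : Claim_equal_plan_batches := by
  intro state _hdom _hpre
  unfold Spec_plan_batches plan_batches plan_batches_alt
  cases hget : (PySem.Dict.mk state).get? "num_rows" with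
  | none => rfl
  | some n =>
    simp only []
    rw [a_closed n, b_closed (pvK n) n 0 rfl]
    congr 1
    congr 1
    refine List.map_congr_left ?_
    intro k _
    norm_num
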